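-- pv_equiv track=rewrite | github.com/sgeller98/project_euler | Solved/Problem_029.py | powerCombosLen
-- ===== SOURCE A (Python) =====
-- def powerCombosLen(bottom, limit):
--     combos = set()
--
--     for a in range(bottom, limit+1):
--         for b in range(bottom, limit+1):
--             p = pow(a, b)
--             if p not in combos:
--                 combos.add(p)
--
--     return len(combos)
-- ===== SOURCE B (Python) =====
-- def _iroot(a, e):
--     """Largest r >= 1 with r**e <= a (binary search), for a >= 1, e >= 1."""
--     lo, hi = 1, a
--     while lo < hi:
--         mid = (lo + hi + 1) // 2
--         if mid ** e <= a:
--             lo = mid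
--         else:
--             hi = mid - 1
--     return lo
--
--
-- def _min_root(a):
--     """a = m**e with e maximal (so m is not itself a perfect power); (a, 1) if a is no perfect power."""
--     e = a.bit_length() - 1
--     while e >= 2:
--         r = _iroot(a, e)
--         if r ** e == a:
--             return r, e
--         e -= 1
--     return a, 1
--
--
-- def powerCombosLen(bottom, limit):
--     if bottom > limit:
--         return 0
--     # a^b = m^(e*b) with (m, e) = _min_root(a); for m >= 2 not a perfect power the
--     # pair (m, e*b) determines the value, so distinct values = distinct pairs,
--     # never touching the huge numbers a^b themselves.
--     pairs = set()
--     for a in range(max(bottom, 2), limit + 1):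
--         m, e = _min_root(a)
--         for b in range(max(bottom, 1), limit + 1):
--             pairs.add((m, e * b))
--     has1 = bottom <= 0 <= limit or bottom <= 1 <= limit   # a^0, 0^0 and 1^b all equal 1
--     has0 = (bottom <= 0 <= limit) and 1 <= limit          # 0^b == 0 for b >= 1
--     return len(pairs) + has1 + has0
-- ===== Notes on version B (the rewrite author's own statement) =====
-- stated objective: alternative
-- what changed: Instead of materialising every bignum a**b and deduplicating them in a set, B writes each base a>=2 as m**e with m its smallest integer root (found by descending-exponent integer k-th roots) and counts distinct small-integer pairs (m, e*b), handling the special values 0 and 1 by closed-form flags.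
-- outside the precondition, e.g. on powerCombosLen(-3, -2): A returns 4, B returns 0
import Mathlib
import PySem

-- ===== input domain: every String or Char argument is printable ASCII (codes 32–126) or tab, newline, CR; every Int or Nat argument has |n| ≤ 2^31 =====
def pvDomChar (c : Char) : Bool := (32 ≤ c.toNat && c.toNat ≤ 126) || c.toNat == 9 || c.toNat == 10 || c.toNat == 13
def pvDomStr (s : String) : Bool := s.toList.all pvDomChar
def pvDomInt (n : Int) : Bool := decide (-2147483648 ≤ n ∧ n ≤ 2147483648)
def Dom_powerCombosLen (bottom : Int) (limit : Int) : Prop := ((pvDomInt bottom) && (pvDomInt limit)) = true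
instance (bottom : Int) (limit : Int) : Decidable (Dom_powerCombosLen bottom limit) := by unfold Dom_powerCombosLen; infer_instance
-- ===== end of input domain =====

-- B counts distinct pairs (m, e*b), with m the smallest integer root of a (a = m**e),
-- instead of deduplicating the bignum values a**b themselves (objective: alternative).

-- ===== PORT A =====
-- pow(a, b) is ported as a ^ b.toNat, exact for b ≥ 0; Pre_ guarantees every exponent is ≥ 0.
def powerCombosLen (bottom : Int) (limit : Int) : Int :=
  PySem.Set.len
    ((PySem.List.pyRange bottom (limit + 1) 1).foldl
      (fun combos a =>
        (PySem.List.pyRange bottom (limit + 1) 1).foldl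
          (fun combos b =>
            if ¬ (PySem.Set.contains combos (a ^ b.toNat)) then
              PySem.Set.add combos (a ^ b.toNat)
            else combos)
          combos)
      PySem.Set.empty)

-- ===== PORT B =====
-- _iroot's binary search: 'while lo < hi: mid = (lo+hi+1)//2; ...'
def bIRoot (a e lo hi : Int) : Int :=
  if h : lo < hi then
    let mid := PySem.Int.floordiv (lo + hi + 1) 2
    if mid ^ e.toNat ≤ a then bIRoot a e mid hi else bIRoot a e lo (mid - 1)
  else lo
termination_by (hi - lo).toNat
decreasing_by
  all_goals
    have hm := PySem.Int.floordiv_eq_ediv_of_pos (a := lo + hi + 1) (b := 2) (by omega)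
    omega

-- _min_root's loop: 'while e >= 2: r = _iroot(a, e); ...; e -= 1'
def bMinRootE (a e : Int) : Int × Int :=
  if h : 2 ≤ e then
    let r := bIRoot a e 1 a
    if r ^ e.toNat = a then (r, e) else bMinRootE a (e - 1)
  else (a, 1)
termination_by (e - 1).toNat
decreasing_by omega

-- _min_root(a): 'e = a.bit_length() - 1' then the descending loop
def bMinRoot (a : Int) : Int × Int := bMinRootE a ((PySem.Int.bitLength a : Int) - 1)

def powerCombosLen_alt (bottom : Int) (limit : Int) : Int :=
  if bottom > limit then 0
  else
    let pairs := (PySem.List.pyRange (max bottom 2) (limit + 1) 1).foldl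
      (fun pairs a =>
        let me := bMinRoot a
        (PySem.List.pyRange (max bottom 1) (limit + 1) 1).foldl
          (fun pairs b => PySem.Set.add pairs (me.1, me.2 * b))
          pairs)
      PySem.Set.empty
    let has1 : Int := if (bottom ≤ 0 ∧ 0 ≤ limit) ∨ (bottom ≤ 1 ∧ 1 ≤ limit) then 1 else 0
    let has0 : Int := if (bottom ≤ 0 ∧ 0 ≤ limit) ∧ 1 ≤ limit then 1 else 0
    PySem.Set.len pairs + has1 + has0

-- ===== PRECONDITION & SPEC =====
-- Pre_ excludes inputs whose grid contains a negative exponent (bottom < 0 with a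
-- nonempty range): there Python's pow returns floats, so A counts float values —
-- or raises ZeroDivisionError at 0 ** negative when the range also contains 0.
def Pre_powerCombosLen (bottom : Int) (limit : Int) : Prop := 0 ≤ bottom ∨ limit < bottom
instance (bottom : Int) (limit : Int) : Decidable (Pre_powerCombosLen bottom limit) := by
  unfold Pre_powerCombosLen; infer_instance

def pvWitness_powerCombosLen : Int × Int := (0, 5)

def Spec_powerCombosLen (bottom : Int) (limit : Int) (out : Int) : Prop := out = powerCombosLen_alt bottom limit
instance (bottom : Int) (limit : Int) (out : Int) : Decidable (Spec_powerCombosLen bottom limit out) := by unfold Spec_powerCombosLen; infer_instance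

-- ===== CLAIM (what is proved, stated in full; the proofs are below) =====
def Claim_equal_powerCombosLen : Prop := ∀ (bottom : Int) (limit : Int), Dom_powerCombosLen bottom limit → Pre_powerCombosLen bottom limit → Spec_powerCombosLen bottom limit (powerCombosLen bottom limit)

-- ===== LEMMAS AND PROOFS =====

-- the binary search returns the largest r with r ^ e ≤ a
theorem bIRoot_spec (a e lo hi : Int) :
    1 ≤ lo → lo ≤ hi → lo ^ e.toNat ≤ a → a < (hi + 1) ^ e.toNat →
    1 ≤ bIRoot a e lo hi ∧ (bIRoot a e lo hi) ^ e.toNat ≤ a ∧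
      a < (bIRoot a e lo hi + 1) ^ e.toNat := by
  fun_induction bIRoot a e lo hi with
  | case1 lo hi h mid hle ih =>
    intro h1 hlh hlo hhi
    have hm : mid = (lo + hi + 1) / 2 :=
      PySem.Int.floordiv_eq_ediv_of_pos (a := lo + hi + 1) (b := 2) (by omega)
    exact ih (by omega) (by omega) hle hhi
  | case2 lo hi h mid hgt ih =>
    intro h1 hlh hlo hhi
    have hm : mid = (lo + hi + 1) / 2 :=
      PySem.Int.floordiv_eq_ediv_of_pos (a := lo + hi + 1) (b := 2) (by omega)
    have hmid : mid - 1 + 1 = mid := by ring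
    exact ih h1 (by omega) hlo (by rw [hmid]; omega)
  | case3 lo hi h =>
    intro h1 hlh hlo hhi
    have : lo = hi := by omega
    subst this
    exact ⟨h1, hlo, hhi⟩

-- every result of the descending loop is a root decomposition of a
theorem bMinRootE_sound (a e : Int) (ha : 2 ≤ a) :
    2 ≤ (bMinRootE a e).1 ∧ 1 ≤ (bMinRootE a e).2 ∧
      (bMinRootE a e).1 ^ (bMinRootE a e).2.toNat = a := by
  fun_induction bMinRootE a e with
  | case1 e h r heq =>
    obtain ⟨hr1, hrle, hrgt⟩ := bIRoot_spec a e 1 a (le_refl 1) (by omega)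
      (by rw [one_pow]; omega)
      (by
        have : a + 1 ≤ (a + 1) ^ e.toNat := le_self_pow₀ (by omega) (by omega)
        omega)
    have hr2 : 2 ≤ r := by
      by_contra hc
      have hr1' : r = 1 := by omega
      rw [hr1', one_pow] at heq
      omega
    exact ⟨hr2, by simpa using (by omega : (1:Int) ≤ e), heq⟩
  | case2 e h r heq ih => exact ih
  | case3 e h =>
    refine ⟨ha, by norm_num, ?_⟩
    show a ^ ((1:Int)).toNat = a
    norm_num

-- the loop returns the largest exponent of any root decomposition within range
theorem bMinRootE_max (a e : Int) (ha : 2 ≤ a) :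
    ∀ (k : Nat) (c : Int), 2 ≤ k → (k : Int) ≤ e → 1 ≤ c → c ^ k = a →
      (k : Int) ≤ (bMinRootE a e).2 := by
  fun_induction bMinRootE a e with
  | case1 e h r heq =>
    intro k c hk2 hke hc hck
    exact hke
  | case2 e h r heq ih =>
    intro k c hk2 hke hc hck
    have hrdef : r = bIRoot a e 1 a := rfl
    have hne : (k : Int) ≠ e := by
      intro hkeq
      obtain ⟨hr1, hrle, hrgt⟩ := bIRoot_spec a e 1 a (le_refl 1) (by omega)
        (by rw [one_pow]; omega)
        (by
          have : a + 1 ≤ (a + 1) ^ e.toNat := le_self_pow₀ (by omega) (by omega)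
          omega)
      have heN : e.toNat = k := by omega
      rcases lt_or_ge r c with hcr | hcr
      · have hr1c : r + 1 ≤ c := by omega
        have hle2 : (r + 1) ^ k ≤ c ^ k := pow_le_pow_left₀ (by omega) hr1c k
        rw [hck, ← heN, hrdef] at hle2
        omega
      · have hle2 : c ^ k ≤ r ^ k := pow_le_pow_left₀ (by omega) hcr k
        rw [hck, hrdef] at hle2
        apply heq
        rw [hrdef, heN]
        rw [heN] at hrle
        omega
    exact ih k c hk2 (by omega) hc hck
  | case3 e h =>
    intro k c hk2 hke hc hck
    omega

theorem bMinRoot_sound (v : Int) (hv : 2 ≤ v) :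
    2 ≤ (bMinRoot v).1 ∧ 1 ≤ (bMinRoot v).2 ∧ (bMinRoot v).1 ^ (bMinRoot v).2.toNat = v :=
  bMinRootE_sound v _ hv

-- the base returned by bMinRoot is not itself a perfect power
theorem bMinRoot_npp (v : Int) (hv : 2 ≤ v) :
    ∀ c : Int, ∀ k : Nat, 2 ≤ c → 2 ≤ k → c ^ k ≠ (bMinRoot v).1 := by
  intro c k hc hk hcon
  obtain ⟨hm2, hf1, hpow⟩ := bMinRoot_sound v hv
  have hfN : ((bMinRoot v).2.toNat : Int) = (bMinRoot v).2 := Int.toNat_of_nonneg (by omega)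
  have hv_eq : c ^ (k * (bMinRoot v).2.toNat) = v := by rw [pow_mul, hcon, hpow]
  have h2pow : (2 : Int) ^ (k * (bMinRoot v).2.toNat) ≤ v := by
    calc (2:Int) ^ (k * (bMinRoot v).2.toNat) ≤ c ^ (k * (bMinRoot v).2.toNat) :=
      pow_le_pow_left₀ (by omega) hc _
    _ = v := hv_eq
  have hbit : k * (bMinRoot v).2.toNat < PySem.Int.bitLength v := by
    have h1 : v.natAbs < 2 ^ PySem.Int.bitLength v := PySem.Int.lt_two_pow_bitLength v
    have h2 : 2 ^ (k * (bMinRoot v).2.toNat) ≤ v.natAbs := by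
      have hcast : ((2 ^ (k * (bMinRoot v).2.toNat) : Nat) : Int)
          = (2:Int) ^ (k * (bMinRoot v).2.toNat) := by push_cast; ring
      omega
    exact (Nat.pow_lt_pow_iff_right (by omega : 1 < 2)).mp (lt_of_le_of_lt h2 h1)
  have hk2' : 2 ≤ k * (bMinRoot v).2.toNat := by
    calc 2 = 2 * 1 := by norm_num
    _ ≤ k * (bMinRoot v).2.toNat := Nat.mul_le_mul hk (by omega)
  have hmax := bMinRootE_max v ((PySem.Int.bitLength v : Int) - 1) hv
    (k * (bMinRoot v).2.toNat) c hk2' (by omega) (by omega) hv_eq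
  have h2f : 2 * (bMinRoot v).2.toNat ≤ k * (bMinRoot v).2.toNat :=
    Nat.mul_le_mul_right _ hk
  have hbm : (bMinRoot v).2 = (bMinRootE v ((PySem.Int.bitLength v : Int) - 1)).2 := rfl
  omega

-- uniqueness of the representation m ^ k (m ≥ 2 not a perfect power, k ≥ 1), over Nat
theorem nppPowInjNat (m1 m2 k1 k2 : Nat) (_h1 : 2 ≤ m1) (_h2 : 2 ≤ m2)
    (hk1 : 1 ≤ k1) (hk2 : 1 ≤ k2)
    (n1 : ∀ c k : Nat, 2 ≤ k → c ^ k ≠ m1) (n2 : ∀ c k : Nat, 2 ≤ k → c ^ k ≠ m2)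
    (h : m1 ^ k1 = m2 ^ k2) : m1 = m2 ∧ k1 = k2 := by
  obtain ⟨c, hc1, hc2⟩ := Nat.exists_eq_pow_of_pow_eq_pow (Or.inl (by omega)) h
  have hg : 0 < Nat.gcd k1 k2 := Nat.gcd_pos_of_pos_left k2 (by omega)
  have hd1 : Nat.gcd k1 k2 ∣ k1 := Nat.gcd_dvd_left k1 k2
  have hd2 : Nat.gcd k1 k2 ∣ k2 := Nat.gcd_dvd_right k1 k2
  have hq2 : 1 ≤ k2 / Nat.gcd k1 k2 := Nat.one_le_div_iff hg |>.mpr (Nat.le_of_dvd (by omega) hd2)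
  have hq1 : 1 ≤ k1 / Nat.gcd k1 k2 := Nat.one_le_div_iff hg |>.mpr (Nat.le_of_dvd (by omega) hd1)
  have he2 : k2 / Nat.gcd k1 k2 = 1 := by
    by_contra hc
    exact n1 c (k2 / Nat.gcd k1 k2) (by omega) hc1.symm
  have he1 : k1 / Nat.gcd k1 k2 = 1 := by
    by_contra hc
    exact n2 c (k1 / Nat.gcd k1 k2) (by omega) hc2.symm
  have hk2g : k2 = Nat.gcd k1 k2 := by
    have hx := Nat.div_mul_cancel hd2
    rw [he2] at hx
    omega
  have hk1g : k1 = Nat.gcd k1 k2 := by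
    have hx := Nat.div_mul_cancel hd1
    rw [he1] at hx
    omega
  have hkk : k1 = k2 := by omega
  subst hkk
  exact ⟨Nat.pow_left_injective (by omega) h, rfl⟩

-- the same uniqueness over Int (all bases ≥ 2)
theorem nppPowInjInt (m1 m2 : Int) (k1 k2 : Nat) (h1 : 2 ≤ m1) (h2 : 2 ≤ m2)
    (hk1 : 1 ≤ k1) (hk2 : 1 ≤ k2)
    (n1 : ∀ c : Int, ∀ k : Nat, 2 ≤ c → 2 ≤ k → c ^ k ≠ m1)
    (n2 : ∀ c : Int, ∀ k : Nat, 2 ≤ c → 2 ≤ k → c ^ k ≠ m2)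
    (h : m1 ^ k1 = m2 ^ k2) : m1 = m2 ∧ k1 = k2 := by
  have hn : m1.toNat ^ k1 = m2.toNat ^ k2 := by
    have hx := congrArg Int.toNat h
    rwa [Int.toNat_pow_of_nonneg (by omega), Int.toNat_pow_of_nonneg (by omega)] at hx
  have transfer : ∀ (mi : Int), 2 ≤ mi →
      (∀ c : Int, ∀ k : Nat, 2 ≤ c → 2 ≤ k → c ^ k ≠ mi) →
      (∀ c k : Nat, 2 ≤ k → c ^ k ≠ mi.toNat) := by
    intro mi hmi ni c k hk hcon
    rcases Nat.lt_or_ge c 2 with hc | hc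
    · have hle : c ^ k ≤ 1 := by
        calc c ^ k ≤ 1 ^ k := Nat.pow_le_pow_left (by omega) k
        _ = 1 := one_pow k
      omega
    · refine ni (c : Int) k (by exact_mod_cast hc) hk ?_
      have hcast : ((c : Int)) ^ k = ((c ^ k : Nat) : Int) := by push_cast; ring
      rw [hcast, hcon]
      omega
  obtain ⟨hm, hk⟩ := nppPowInjNat m1.toNat m2.toNat k1 k2 (by omega) (by omega) hk1 hk2
    (transfer m1 h1 n1) (transfer m2 h2 n2) hn
  exact ⟨by omega, hk⟩

-- the minimal-root decomposition of a ^ b is (m, e * b) where (m, e) = bMinRoot a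
theorem bMinRoot_val (a b : Int) (ha : 2 ≤ a) (hb : 1 ≤ b) :
    bMinRoot (a ^ b.toNat) = ((bMinRoot a).1, (bMinRoot a).2 * b) := by
  obtain ⟨hm2, he1, hpow⟩ := bMinRoot_sound a ha
  have hv2 : 2 ≤ a ^ b.toNat := le_trans ha (le_self_pow₀ (by omega) (by omega))
  obtain ⟨rm2, rf1, rpow⟩ := bMinRoot_sound (a ^ b.toNat) hv2
  have hnpa := bMinRoot_npp a ha
  have hnpv := bMinRoot_npp (a ^ b.toNat) hv2
  have heq : (bMinRoot (a ^ b.toNat)).1 ^ (bMinRoot (a ^ b.toNat)).2.toNat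
      = (bMinRoot a).1 ^ ((bMinRoot a).2.toNat * b.toNat) := by
    rw [rpow, pow_mul, hpow]
  obtain ⟨hrm, hfk⟩ := nppPowInjInt (bMinRoot (a ^ b.toNat)).1 (bMinRoot a).1
    (bMinRoot (a ^ b.toNat)).2.toNat ((bMinRoot a).2.toNat * b.toNat)
    rm2 hm2 (by omega) (Nat.mul_pos (by omega) (by omega)) hnpv hnpa heq
  have hf : (bMinRoot (a ^ b.toNat)).2 = (bMinRoot a).2 * b := by
    have hcast : (((bMinRoot a).2.toNat * b.toNat : Nat) : Int) = (bMinRoot a).2 * b := by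
      push_cast
      rw [Int.toNat_of_nonneg (by omega), Int.toNat_of_nonneg (by omega)]
    rw [← hcast, ← hfk]
    omega
  have hsplit : bMinRoot (a ^ b.toNat)
      = ((bMinRoot (a ^ b.toNat)).1, (bMinRoot (a ^ b.toNat)).2) := rfl
  rw [hsplit, hrm, hf]

-- ==== counting machinery ====

-- Python's 'if p not in s: s.add(p)' is just set-add
theorem condAdd {β : Type} [BEq β] [LawfulBEq β] (s : PySem.Set β) (p : β) :
    (if ¬ (PySem.Set.contains s p) then PySem.Set.add s p else s) = PySem.Set.add s p := by
  by_cases h : p ∈ s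
  · rw [if_neg (by simp [h]), PySem.Set.add_of_mem h]
  · rw [if_pos (by simp [h])]

-- a loop of set-updates is one update by the concatenation
theorem foldl_update_flatMap {α β : Type} [BEq β] (l : List α) (g : α → List β)
    (s : PySem.Set β) :
    l.foldl (fun s a => PySem.Set.update s (g a)) s = PySem.Set.update s (l.flatMap g) := by
  induction l generalizing s with
  | nil => simp [PySem.Set.update_nil]
  | cons x xs ih => simp [List.flatMap_cons, PySem.Set.update_append, ih]

-- |set(L)| is the number of distinct elements of L
theorem len_ofList_card {β : Type} [DecidableEq β] [BEq β] [LawfulBEq β] (L : List β) :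
    PySem.Set.len (PySem.Set.ofList L) = (L.toFinset.card : Int) := by
  have nd : (PySem.Set.ofList L).Nodup := PySem.Set.nodup_ofList L
  have hc : (PySem.Set.ofList L).toFinset = L.toFinset := by
    ext x
    simp [PySem.Set.mem_ofList]
  rw [← hc, List.toFinset_card_of_nodup nd]
  simp [PySem.Set.len]

-- the flattened list of values A inserts
def valList (bottom limit : Int) : List Int :=
  (PySem.List.pyRange bottom (limit + 1) 1).flatMap
    (fun a => (PySem.List.pyRange bottom (limit + 1) 1).map (fun b => a ^ b.toNat))

-- the values of the restricted grid a ≥ 2, b ≥ 1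
def val2List (bottom limit : Int) : List Int :=
  (PySem.List.pyRange (max bottom 2) (limit + 1) 1).flatMap
    (fun a => (PySem.List.pyRange (max bottom 1) (limit + 1) 1).map (fun b => a ^ b.toNat))

-- the flattened list of pairs B inserts
def pairList (bottom limit : Int) : List (Int × Int) :=
  (PySem.List.pyRange (max bottom 2) (limit + 1) 1).flatMap
    (fun a => (PySem.List.pyRange (max bottom 1) (limit + 1) 1).map
      (fun b => ((bMinRoot a).1, (bMinRoot a).2 * b)))

theorem mem_valList (bottom limit x : Int) :
    x ∈ valList bottom limit ↔
    ∃ a, (bottom ≤ a ∧ a ≤ limit) ∧ ∃ b, (bottom ≤ b ∧ b ≤ limit) ∧ a ^ b.toNat = x := by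
  unfold valList
  simp only [List.mem_flatMap, List.mem_map, PySem.List.mem_pyRange_one]
  constructor
  · rintro ⟨a, ⟨h1, h2⟩, b, ⟨h3, h4⟩, h5⟩
    exact ⟨a, ⟨h1, by omega⟩, b, ⟨h3, by omega⟩, h5⟩
  · rintro ⟨a, ⟨h1, h2⟩, b, ⟨h3, h4⟩, h5⟩
    exact ⟨a, ⟨h1, by omega⟩, b, ⟨h3, by omega⟩, h5⟩

theorem mem_val2List (bottom limit x : Int) :
    x ∈ val2List bottom limit ↔
    ∃ a, (max bottom 2 ≤ a ∧ a ≤ limit) ∧ ∃ b, (max bottom 1 ≤ b ∧ b ≤ limit) ∧ a ^ b.toNat = x := by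
  unfold val2List
  simp only [List.mem_flatMap, List.mem_map, PySem.List.mem_pyRange_one]
  constructor
  · rintro ⟨a, ⟨h1, h2⟩, b, ⟨h3, h4⟩, h5⟩
    exact ⟨a, ⟨h1, by omega⟩, b, ⟨h3, by omega⟩, h5⟩
  · rintro ⟨a, ⟨h1, h2⟩, b, ⟨h3, h4⟩, h5⟩
    exact ⟨a, ⟨h1, by omega⟩, b, ⟨h3, by omega⟩, h5⟩

-- elements of the restricted grid are at least 2
theorem val2_ge_two (bottom limit x : Int) (hx : x ∈ val2List bottom limit) : 2 ≤ x := by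
  rw [mem_val2List] at hx
  obtain ⟨a, ⟨h1, h2⟩, b, ⟨h3, h4⟩, h5⟩ := hx
  have ha : 2 ≤ a := le_trans (le_max_right bottom 2) h1
  have hb : 1 ≤ b := le_trans (le_max_right bottom 1) h3
  calc (2 : Int) ≤ a := ha
  _ ≤ a ^ b.toNat := le_self_pow₀ (by omega) (by omega)
  _ = x := h5

-- A's port counts the distinct elements of valList
theorem A_eq_card (bottom limit : Int) :
    powerCombosLen bottom limit = ((valList bottom limit).toFinset.card : Int) := by
  unfold powerCombosLen
  have hinner : ∀ (a : Int) (s : PySem.Set Int),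
      (PySem.List.pyRange bottom (limit + 1) 1).foldl
        (fun combos b => if ¬ (PySem.Set.contains combos (a ^ b.toNat)) then
            PySem.Set.add combos (a ^ b.toNat) else combos) s
      = PySem.Set.update s ((PySem.List.pyRange bottom (limit + 1) 1).map (fun b => a ^ b.toNat)) := by
    intro a s
    rw [PySem.Set.update_map_eq_foldl_add]
    simp only [condAdd]
  simp only [hinner]
  rw [foldl_update_flatMap, PySem.Set.update_empty]
  exact len_ofList_card _

-- B's port counts the distinct pairs plus the 0/1 flags
theorem B_eq_card (bottom limit : Int) (h : ¬ bottom > limit) :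
    powerCombosLen_alt bottom limit =
      ((pairList bottom limit).toFinset.card : Int)
      + (if (bottom ≤ 0 ∧ 0 ≤ limit) ∨ (bottom ≤ 1 ∧ 1 ≤ limit) then 1 else 0)
      + (if (bottom ≤ 0 ∧ 0 ≤ limit) ∧ 1 ≤ limit then 1 else 0) := by
  unfold powerCombosLen_alt
  rw [if_neg h]
  have hinner : ∀ (a : Int) (s : PySem.Set (Int × Int)),
      (PySem.List.pyRange (max bottom 1) (limit + 1) 1).foldl
        (fun pairs b => PySem.Set.add pairs ((bMinRoot a).1, (bMinRoot a).2 * b)) s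
      = PySem.Set.update s ((PySem.List.pyRange (max bottom 1) (limit + 1) 1).map
          (fun b => ((bMinRoot a).1, (bMinRoot a).2 * b))) := by
    intro a s
    rw [PySem.Set.update_map_eq_foldl_add]
  simp only [hinner]
  rw [foldl_update_flatMap, PySem.Set.update_empty]
  rw [len_ofList_card]
  rfl

-- pointwise-equal flatMaps agree
theorem flatMapCongr {α β : Type} {l : List α} {f g : α → List β} (h : ∀ a ∈ l, f a = g a) :
    l.flatMap f = l.flatMap g := by
  induction l with
  | nil => rfl
  | cons x xs ih =>
    simp only [List.flatMap_cons]
    rw [h x (by simp), ih (fun a ha => h a (by simp [ha]))]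

-- B's pairs are the minimal-root decompositions of the restricted values
theorem pairList_eq_map (bottom limit : Int) :
    pairList bottom limit = (val2List bottom limit).map (fun v => bMinRoot v) := by
  unfold pairList val2List
  rw [List.map_flatMap]
  apply flatMapCongr
  intro a ha
  rw [List.map_map]
  apply List.map_congr_left
  intro b hb
  rw [PySem.List.mem_pyRange_one] at ha hb
  have ha2 : 2 ≤ a := le_trans (le_max_right bottom 2) ha.1
  have hb1 : 1 ≤ b := le_trans (le_max_right bottom 1) hb.1
  exact (bMinRoot_val a b ha2 hb1).symm

-- distinct pairs = distinct restricted values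
theorem card_pairs_eq (bottom limit : Int) :
    (pairList bottom limit).toFinset.card = (val2List bottom limit).toFinset.card := by
  rw [pairList_eq_map]
  have himg : ((val2List bottom limit).map (fun v => bMinRoot v)).toFinset
      = (val2List bottom limit).toFinset.image (fun v => bMinRoot v) := by
    ext x
    simp
  rw [himg]
  apply Finset.card_image_of_injOn
  intro x hx y hy hxy
  simp only [List.coe_toFinset, Set.mem_setOf_eq] at hx hy
  have hx2 : 2 ≤ x := val2_ge_two bottom limit x hx
  have hy2 : 2 ≤ y := val2_ge_two bottom limit y hy
  have px := (bMinRoot_sound x hx2).2.2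
  have py := (bMinRoot_sound y hy2).2.2
  have hxy' : bMinRoot x = bMinRoot y := hxy
  rw [← px, ← py, hxy']

-- the special values contributed by bases 0, 1 and exponent 0
def S01f (bottom limit : Int) : Finset Int :=
  if bottom ≤ 0 ∧ 1 ≤ limit then {0, 1} else if bottom ≤ 1 then {1} else ∅

theorem valList_toFinset (bottom limit : Int) (h0 : 0 ≤ bottom) (hbl : bottom ≤ limit) :
    (valList bottom limit).toFinset = S01f bottom limit ∪ (val2List bottom limit).toFinset := by
  ext x
  simp only [List.mem_toFinset, Finset.mem_union, mem_valList, mem_val2List]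
  constructor
  · rintro ⟨a, ⟨ha1, ha2⟩, b, ⟨hb1, hb2⟩, rfl⟩
    by_cases hab : 2 ≤ a ∧ 1 ≤ b
    · exact Or.inr ⟨a, ⟨by omega, ha2⟩, b, ⟨by omega, hb2⟩, rfl⟩
    · left
      unfold S01f
      rcases Decidable.em (b = 0) with hb0 | hb0
      · subst hb0
        simp only [Int.toNat_zero, pow_zero]
        split_ifs with h1 h2
        · simp
        · simp
        · omega
      · have hb1' : 1 ≤ b := by omega
        have ha01 : a = 0 ∨ a = 1 := by omega
        rcases ha01 with rfl | rfl
        · rw [zero_pow (by omega : b.toNat ≠ 0)]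
          rw [if_pos ⟨by omega, by omega⟩]
          simp
        · rw [one_pow]
          split_ifs with h1
          · simp
          · simp
  · rintro (hs | ⟨a, ⟨ha1, ha2⟩, b, ⟨hb1, hb2⟩, rfl⟩)
    · unfold S01f at hs
      split_ifs at hs with h1 h2
      · simp only [Finset.mem_insert, Finset.mem_singleton] at hs
        rcases hs with rfl | rfl
        · exact ⟨0, ⟨by omega, by omega⟩, 1, ⟨by omega, by omega⟩, by norm_num⟩
        · exact ⟨0, ⟨by omega, by omega⟩, 0, ⟨by omega, by omega⟩, by norm_num⟩
      · simp only [Finset.mem_singleton] at hs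
        subst hs
        rcases Decidable.em (bottom = 0) with rfl | hbne
        · exact ⟨0, ⟨by omega, by omega⟩, 0, ⟨by omega, by omega⟩, by norm_num⟩
        · have hb1 : bottom = 1 := by omega
          exact ⟨1, ⟨by omega, by omega⟩, 1, ⟨by omega, by omega⟩, by norm_num⟩
      · simp at hs
    · exact ⟨a, ⟨by omega, ha2⟩, b, ⟨by omega, hb2⟩, rfl⟩

theorem S01f_disjoint (bottom limit : Int) :
    Disjoint (S01f bottom limit) (val2List bottom limit).toFinset := by
  rw [Finset.disjoint_left]
  intro x hx hx2
  have h2 : 2 ≤ x := val2_ge_two bottom limit x (List.mem_toFinset.mp hx2)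
  unfold S01f at hx
  split_ifs at hx
  · simp only [Finset.mem_insert, Finset.mem_singleton] at hx
    omega
  · simp only [Finset.mem_singleton] at hx
    omega
  · simp at hx

theorem S01f_card (bottom limit : Int) (h0 : 0 ≤ bottom) (hbl : bottom ≤ limit) :
    ((S01f bottom limit).card : Int)
      = (if (bottom ≤ 0 ∧ 0 ≤ limit) ∨ (bottom ≤ 1 ∧ 1 ≤ limit) then 1 else 0)
      + (if (bottom ≤ 0 ∧ 0 ≤ limit) ∧ 1 ≤ limit then 1 else 0) := by
  unfold S01f
  split_ifs with h1 h2 <;> simp_all <;> omega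




theorem equiv_main : ∀ (bottom : Int) (limit : Int), Pre_powerCombosLen bottom limit →
    powerCombosLen bottom limit = powerCombosLen_alt bottom limit := by
  intro bottom limit hpre
  rcases Decidable.em (limit < bottom) with hlt | hge
  · unfold powerCombosLen powerCombosLen_alt
    rw [PySem.List.pyRange_one_eq_nil (by omega : limit + 1 ≤ bottom)]
    rw [if_pos (by omega : bottom > limit)]
    simp [PySem.Set.len, PySem.Set.empty]
  · have h0 : 0 ≤ bottom := by
      rcases hpre with h | h
      · exact h
      · omega
    have hbl : bottom ≤ limit := by omega
    rw [A_eq_card, B_eq_card bottom limit (by omega)]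
    rw [valList_toFinset bottom limit h0 hbl]
    rw [Finset.card_union_of_disjoint (S01f_disjoint bottom limit)]
    rw [card_pairs_eq]
    push_cast
    rw [S01f_card bottom limit h0 hbl]
    ring

-- ===== VERDICT (by name: the statement is the Claim_ definition above) =====
theorem powerCombosLen_spec : Claim_equal_powerCombosLen := by
  intro bottom limit _ hpre
  exact equiv_main bottom limit hpre
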